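-- pv_equiv track=rewrite | github.com/smezin/CODING-Challenges-and-Competitions | leetcode/odd_even_jump.py | next_from_even
-- ===== SOURCE A (Python) =====
-- def next_from_even(index: int, arr):
--     if (index == -1):
--         return -1
--     next_smaller = None
--     next_smaller_i = -1
--     for i in range(index, len(arr)):
--         if arr[i] == arr[index] and i > index:
--             return i
--         if arr[i] < arr[index]:
--             if next_smaller is None or arr[i] > next_smaller:
--                 next_smaller_i = i
--                 next_smaller = arr[i]
--     if next_smaller_i < index:
--         return -1
--     return next_smaller_i
-- ===== SOURCE B (Python) =====
-- def next_from_even(index: int, arr):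
--     if index == -1:
--         return -1
--     cands = [i for i in range(index + 1, len(arr)) if arr[i] <= arr[index]]
--     if not cands:
--         return -1
--     return max(cands, key=lambda i: (arr[i], -i))
-- ===== Notes on version B (the rewrite author's own statement) =====
-- stated objective: simpler
-- what changed: Replaced A's single stateful forward scan (running next-smaller value/index pair with an early return on the first later equal element) by a declarative two-step pipeline: build the candidate list of later positions with arr[i] <= arr[index], then take max(cands, key=lambda i: (arr[i], -i)) (or -1 if empty).
import Mathlib
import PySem

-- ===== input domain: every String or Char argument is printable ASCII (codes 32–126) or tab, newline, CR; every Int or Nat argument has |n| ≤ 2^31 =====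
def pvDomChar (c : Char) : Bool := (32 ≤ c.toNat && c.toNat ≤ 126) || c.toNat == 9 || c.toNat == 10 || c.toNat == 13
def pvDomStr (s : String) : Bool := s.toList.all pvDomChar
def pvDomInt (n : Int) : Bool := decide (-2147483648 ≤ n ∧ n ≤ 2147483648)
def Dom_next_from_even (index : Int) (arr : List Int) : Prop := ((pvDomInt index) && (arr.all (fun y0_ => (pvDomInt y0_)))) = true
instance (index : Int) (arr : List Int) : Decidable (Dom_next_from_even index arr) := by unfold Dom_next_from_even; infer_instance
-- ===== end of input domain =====

-- B replaces the stateful scan by filter + max-with-key; equal return values proved on Pre_ (A raises outside it).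
-- ===== PORT A =====
def nfeLoop (index : Int) (arr : List Int) : List Int → Option Int → Int → Int
  | [], _ns, nsI => if nsI < index then -1 else nsI
  | i :: rest, ns, nsI =>
    let ai := PySem.List.pyGetD arr i 0
    let apv := PySem.List.pyGetD arr index 0
    if ai = apv ∧ index < i then i
    else if ai < apv then
      if ns = none ∨ ns.getD 0 < ai then nfeLoop index arr rest (some ai) i
      else nfeLoop index arr rest ns nsI
    else nfeLoop index arr rest ns nsI

def next_from_even (index : Int) (arr : List Int) : Int :=
  if index = -1 then -1
  else nfeLoop index arr (PySem.List.pyRange index (arr.length : Int)) none (-1)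

-- ===== PORT B =====
def next_from_even_alt (index : Int) (arr : List Int) : Int :=
  if index = -1 then -1
  else
    let cands := (PySem.List.pyRange (index + 1) (arr.length : Int)).filter
      (fun i => decide (PySem.List.pyGetD arr i 0 ≤ PySem.List.pyGetD arr index 0))
    if cands.isEmpty then -1
    else
      match PySem.List.max2? cands (fun i => PySem.List.pyGetD arr i 0) (fun i : Int => -i) with
      | some m => m
      | none => -1

-- ===== PRECONDITION & SPEC =====
-- Pre_ excludes exactly the inputs where A raises: index < -len(arr) (and not the -1 sentinel),
-- where arr[i] raises IndexError on the loop's first iteration.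
def Pre_next_from_even (index : Int) (arr : List Int) : Prop :=
  index = -1 ∨ -(arr.length : Int) ≤ index
instance (index : Int) (arr : List Int) : Decidable (Pre_next_from_even index arr) := by
  unfold Pre_next_from_even; infer_instance
def pvWitness_next_from_even : Int × List Int := (0, [2, 1])

def Spec_next_from_even (index : Int) (arr : List Int) (out : Int) : Prop := out = next_from_even_alt index arr
instance (index : Int) (arr : List Int) (out : Int) : Decidable (Spec_next_from_even index arr out) := by unfold Spec_next_from_even; infer_instance

-- ===== CLAIM (what is proved, stated in full; the proofs are below) =====
def Claim_equal_next_from_even : Prop := ∀ (index : Int) (arr : List Int), Dom_next_from_even index arr → Pre_next_from_even index arr → Spec_next_from_even index arr (next_from_even index arr)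

-- ===== LEMMAS AND PROOFS =====
-- B-side fold step: running best candidate index (largest value, earliest on ties)
def bStep (arr : List Int) (st : Option Int) (i : Int) : Option Int :=
  match st with
  | none => some i
  | some m => if PySem.List.pyGetD arr m 0 < PySem.List.pyGetD arr i 0 then some i else st

-- combined step over the unfiltered range: filter test fused into the fold
def cStep (arr : List Int) (pivot : Int) (st : Option Int) (i : Int) : Option Int :=
  if PySem.List.pyGetD arr i 0 ≤ pivot then bStep arr st i else st

def outF : Option Int → Int
  | none => -1
  | some m => m

-- max2?'s fold step, specialised to key (arr[i], -i), named so proofs can rewrite it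
def m2Step (arr : List Int) (acc : Option Int) (x : Int) : Option Int :=
  match acc with
  | none => some x
  | some m =>
    if (decide (PySem.List.pyGetD arr m 0 < PySem.List.pyGetD arr x 0) ||
        !decide (PySem.List.pyGetD arr x 0 < PySem.List.pyGetD arr m 0) && decide (-m < -x)) = true
    then some x else some m

theorem max2_eq_aux (arr : List Int) (L : List Int) : ∀ (acc : Option Int),
    L.Pairwise (· < ·) → (∀ x ∈ L, ∀ m, acc = some m → m < x) →
    L.foldl (m2Step arr) acc = L.foldl (bStep arr) acc := by
  induction L with
  | nil => intro acc _ _; rfl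
  | cons x L ih =>
    intro acc hp hacc
    obtain ⟨hx, hp'⟩ := List.pairwise_cons.mp hp
    simp only [List.foldl_cons]
    have hstep : m2Step arr acc x = bStep arr acc x := by
      cases acc with
      | none => rfl
      | some m =>
        have hmx : m < x := hacc x (by simp) m rfl
        have hnot : ¬ ((-m : Int) < -x) := by omega
        simp [m2Step, bStep, hnot]
    rw [hstep]
    apply ih _ hp'
    intro y hy m hm
    cases acc with
    | none =>
      simp [bStep] at hm
      subst hm; exact hx y hy
    | some m0 =>
      by_cases h : PySem.List.pyGetD arr m0 0 < PySem.List.pyGetD arr x 0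
      · simp [bStep, h] at hm; subst hm; exact hx y hy
      · simp [bStep, h] at hm; subst hm
        exact lt_trans (hacc x (by simp) m0 rfl) (hx y hy)

theorem max2_eq (arr : List Int) (L : List Int) (hp : L.Pairwise (· < ·)) :
    PySem.List.max2? L (fun i => PySem.List.pyGetD arr i 0) (fun i : Int => -i)
      = L.foldl (bStep arr) none := by
  have h0 : PySem.List.max2? L (fun i => PySem.List.pyGetD arr i 0) (fun i : Int => -i)
      = L.foldl (m2Step arr) none := by
    unfold PySem.List.max2?
    congr 1
    funext acc x
    cases acc with
    | none => rfl
    | some m => simp [m2Step]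
  rw [h0]
  exact max2_eq_aux arr L none hp (by intro x _ m hm; cases hm)

theorem cfold_const (arr : List Int) (pivot : Int) (L : List Int) (m : Int)
    (hm : PySem.List.pyGetD arr m 0 = pivot) :
    L.foldl (cStep arr pivot) (some m) = some m := by
  induction L with
  | nil => rfl
  | cons x L ih =>
    have hstep : cStep arr pivot (some m) x = some m := by
      simp only [cStep, bStep]
      by_cases h1 : PySem.List.pyGetD arr x 0 ≤ pivot
      · rw [if_pos h1, if_neg (by omega)]
      · rw [if_neg h1]
    simp only [List.foldl_cons, hstep, ih]

def relState (arr : List Int) (index pivot : Int) (ns : Option Int) (nsI : Int) :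
    Option Int → Prop
  | none => ns = none ∧ nsI = -1
  | some m => ns = some (PySem.List.pyGetD arr m 0) ∧ nsI = m ∧
      PySem.List.pyGetD arr m 0 < pivot ∧ index < m

theorem loop_eq (index : Int) (arr : List Int) (L : List Int) :
    ∀ (ns : Option Int) (nsI : Int) (st : Option Int),
    (∀ i ∈ L, index < i) →
    relState arr index (PySem.List.pyGetD arr index 0) ns nsI st →
    nfeLoop index arr L ns nsI
      = outF (L.foldl (cStep arr (PySem.List.pyGetD arr index 0)) st) := by
  induction L with
  | nil =>
    intro ns nsI st _ hrel
    cases st with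
    | none =>
      obtain ⟨h1, h2⟩ := hrel
      subst h1; subst h2
      simp [nfeLoop, outF]
    | some m =>
      obtain ⟨h1, h2, _h3, h4⟩ := hrel
      subst h1; subst h2
      simp [nfeLoop, outF, not_lt.mpr (le_of_lt h4)]
  | cons i L ih =>
    intro ns nsI st hmem hrel
    have hidx : index < i := hmem i (by simp)
    have hmem' : ∀ j ∈ L, index < j := fun j hj => hmem j (by simp [hj])
    simp only [List.foldl_cons]
    by_cases heq : PySem.List.pyGetD arr i 0 = PySem.List.pyGetD arr index 0
    · -- first equal later element: A returns i, B's fold locks on i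
      have hA : nfeLoop index arr (i :: L) ns nsI = i := by
        simp [nfeLoop, heq, hidx]
      have hstep : cStep arr (PySem.List.pyGetD arr index 0) st i = some i := by
        cases st with
        | none => simp [cStep, bStep, heq]
        | some m =>
          obtain ⟨_, _, h3, _⟩ := hrel
          have h3' : PySem.List.pyGetD arr m 0 < PySem.List.pyGetD arr i 0 := by omega
          simp only [cStep, bStep]
          rw [if_pos (le_of_eq heq), if_pos h3']
      rw [hA, hstep, cfold_const arr _ L i heq, outF]
    · by_cases hlt : PySem.List.pyGetD arr i 0 < PySem.List.pyGetD arr index 0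
      · -- strictly smaller: both sides update by the same strict running-max rule
        cases st with
        | none =>
          obtain ⟨h1, h2⟩ := hrel
          subst h1; subst h2
          have hA : nfeLoop index arr (i :: L) none (-1)
              = nfeLoop index arr L (some (PySem.List.pyGetD arr i 0)) i := by
            simp [nfeLoop, heq, hlt]
          have hstep : cStep arr (PySem.List.pyGetD arr index 0) none i = some i := by
            simp [cStep, bStep, le_of_lt hlt]
          rw [hA, hstep]
          exact ih (some (PySem.List.pyGetD arr i 0)) i (some i) hmem' ⟨rfl, rfl, hlt, hidx⟩
        | some m =>
          obtain ⟨h1, h2, h3, h4⟩ := hrel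
          rw [h1, h2]
          by_cases hup : PySem.List.pyGetD arr m 0 < PySem.List.pyGetD arr i 0
          · have hA : nfeLoop index arr (i :: L) (some (PySem.List.pyGetD arr m 0)) m
                = nfeLoop index arr L (some (PySem.List.pyGetD arr i 0)) i := by
              simp [nfeLoop, heq, hlt, hup]
            have hstep : cStep arr (PySem.List.pyGetD arr index 0) (some m) i = some i := by
              simp [cStep, bStep, le_of_lt hlt, hup]
            rw [hA, hstep]
            exact ih (some (PySem.List.pyGetD arr i 0)) i (some i) hmem' ⟨rfl, rfl, hlt, hidx⟩
          · have hA : nfeLoop index arr (i :: L) (some (PySem.List.pyGetD arr m 0)) m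
                = nfeLoop index arr L (some (PySem.List.pyGetD arr m 0)) m := by
              simp [nfeLoop, heq, hlt, hup]
            have hstep : cStep arr (PySem.List.pyGetD arr index 0) (some m) i = some m := by
              simp [cStep, bStep, le_of_lt hlt, hup]
            rw [hA, hstep]
            exact ih (some (PySem.List.pyGetD arr m 0)) m (some m) hmem' ⟨rfl, rfl, h3, h4⟩
      · -- strictly larger: both sides skip
        have hgt : PySem.List.pyGetD arr index 0 < PySem.List.pyGetD arr i 0 := by
          omega
        have hA : nfeLoop index arr (i :: L) ns nsI = nfeLoop index arr L ns nsI := by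
          simp [nfeLoop, heq, hlt]
        have hstep : cStep arr (PySem.List.pyGetD arr index 0) st i = st := by
          simp [cStep, not_le.mpr hgt]
        rw [hA, hstep]
        exact ih ns nsI st hmem' hrel

theorem bfold_ne_none (arr : List Int) (L : List Int) :
    ∀ (st : Option Int) (x : Int), L.foldl (bStep arr) (bStep arr st x) ≠ none := by
  induction L with
  | nil =>
    intro st x
    cases st with
    | none => simp [bStep]
    | some m => simp only [List.foldl_nil, bStep]; split <;> simp
  | cons y L ih =>
    intro st x
    simp only [List.foldl_cons]
    exact ih (bStep arr st x) y

theorem next_from_even_spec : Claim_equal_next_from_even := by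
  intro index arr _hdom _hpre
  unfold Spec_next_from_even
  by_cases hi : index = -1
  · simp [next_from_even, next_from_even_alt, hi]
  · by_cases hn : index < (arr.length : Int)
    · have hcons : PySem.List.pyRange index (arr.length : Int)
          = index :: PySem.List.pyRange (index + 1) (arr.length : Int) :=
        PySem.List.pyRange_one_cons hn
      have hfirst : nfeLoop index arr
          (index :: PySem.List.pyRange (index + 1) (arr.length : Int)) none (-1)
          = nfeLoop index arr (PySem.List.pyRange (index + 1) (arr.length : Int)) none (-1) := by
        simp [nfeLoop]
      have hA : next_from_even index arr
          = outF ((PySem.List.pyRange (index + 1) (arr.length : Int)).foldl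
              (cStep arr (PySem.List.pyGetD arr index 0)) none) := by
        rw [next_from_even, if_neg hi, hcons, hfirst]
        exact loop_eq index arr _ none (-1) none
          (fun i hii => by have := (PySem.List.mem_pyRange_one.mp hii).1; omega) ⟨rfl, rfl⟩
      have hfilt : (PySem.List.pyRange (index + 1) (arr.length : Int)).foldl
          (cStep arr (PySem.List.pyGetD arr index 0)) none
          = ((PySem.List.pyRange (index + 1) (arr.length : Int)).filter
              (fun i => decide (PySem.List.pyGetD arr i 0 ≤ PySem.List.pyGetD arr index 0))).foldl
              (bStep arr) none := by
        exact PySem.List.foldl_ite_eq_foldl_filter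
          (fun i => PySem.List.pyGetD arr i 0 ≤ PySem.List.pyGetD arr index 0) (bStep arr) _ none
      have hpair : ((PySem.List.pyRange (index + 1) (arr.length : Int)).filter
          (fun i => decide (PySem.List.pyGetD arr i 0 ≤ PySem.List.pyGetD arr index 0))).Pairwise (· < ·) :=
        (PySem.List.pairwise_lt_pyRange_one _ _).filter _
      rw [hA, hfilt]
      rw [next_from_even_alt, if_neg hi]
      simp only
      rw [max2_eq arr _ hpair]
      cases hc : (PySem.List.pyRange (index + 1) (arr.length : Int)).filter
          (fun i => decide (PySem.List.pyGetD arr i 0 ≤ PySem.List.pyGetD arr index 0)) with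
      | nil => simp [outF]
      | cons x cs =>
        simp only [List.isEmpty_cons, List.foldl_cons]
        cases hres : cs.foldl (bStep arr) (bStep arr none x) with
        | none => exact absurd hres (bfold_ne_none arr cs none x)
        | some m => simp [outF]
    · -- index past the end (and not -1): both ranges are empty and both sides return -1
      have h1 : PySem.List.pyRange index (arr.length : Int) = [] :=
        PySem.List.pyRange_one_eq_nil (by omega)
      have h2 : PySem.List.pyRange (index + 1) (arr.length : Int) = [] :=
        PySem.List.pyRange_one_eq_nil (by omega)
      simp [next_from_even, next_from_even_alt, hi, h1, h2, nfeLoop]
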